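-- pv_equiv track=rewrite | github.com/bfletcher4921/Friendly_skies | friendly.py | create_seating_chart
-- ===== SOURCE A (Python) =====
-- def create_seating_chart(rows, columns):
--     seating_chart = []
--
--     for row in range(1, rows + 1):
--         if row in (5, 6, 13, 14):
--             continue
--         row_data = []
--         for col in columns:
--             if row <= 4:
--                 if col == 'B':
--                     row_data.append(' ')
--                 else:
--                     row_data.append(col)
--             else:
--                 row_data.append(col)
--         seating_chart.append(row_data)
--
--     return seating_chart
-- ===== SOURCE B (Python) =====
-- def create_seating_chart(rows, columns):
--     # Closed-form: count how many upper-deck rows (1-4) and regular rows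
--     # (7-12 and 15..rows) exist, then stamp the two precomputed templates.
--     upper = [' ' if c == 'B' else c for c in columns]
--     n_upper = max(0, min(rows, 4))
--     n_plain = max(0, min(rows, 12) - 6) + max(0, rows - 14)
--     return [upper[:] for _ in range(n_upper)] + [list(columns) for _ in range(n_plain)]
-- ===== Notes on version B (the rewrite author's own statement) =====
-- stated objective: alternative
-- what changed: Replaces the per-row loop with skip-tests and an inner per-column loop by a closed-form count of upper and regular rows plus stamping two precomputed template rows.
import Mathlib
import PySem

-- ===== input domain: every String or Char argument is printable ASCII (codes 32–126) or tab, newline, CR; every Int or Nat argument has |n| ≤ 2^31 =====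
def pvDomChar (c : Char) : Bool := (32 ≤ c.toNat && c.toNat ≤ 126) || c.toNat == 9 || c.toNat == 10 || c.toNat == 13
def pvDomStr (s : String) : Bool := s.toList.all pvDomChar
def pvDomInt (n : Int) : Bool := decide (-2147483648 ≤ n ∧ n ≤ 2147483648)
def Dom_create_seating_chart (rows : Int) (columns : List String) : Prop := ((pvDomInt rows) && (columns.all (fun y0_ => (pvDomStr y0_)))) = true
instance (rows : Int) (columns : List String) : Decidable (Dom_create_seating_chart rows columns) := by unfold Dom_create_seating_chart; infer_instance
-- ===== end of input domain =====

-- B replaces A's per-row loop (with skip tests and an inner per-column loop) by a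
-- closed-form count of upper and regular rows and stamps two precomputed templates.

-- ===== PORT A =====
def create_seating_chart (rows : Int) (columns : List String) : List (List String) :=
  (PySem.List.pyRange 1 (rows + 1) 1).foldl (fun seating_chart row =>
    if row = 5 ∨ row = 6 ∨ row = 13 ∨ row = 14 then seating_chart
    else
      seating_chart ++ [columns.foldl (fun row_data col =>
        if row ≤ 4 then
          if col == "B" then row_data ++ [" "] else row_data ++ [col]
        else row_data ++ [col]) []]) []

-- ===== PORT B =====
def create_seating_chart_alt (rows : Int) (columns : List String) : List (List String) :=
  let upper := columns.map (fun c => if c == "B" then " " else c)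
  let n_upper := max 0 (min rows 4)
  let n_plain := max 0 (min rows 12 - 6) + max 0 (rows - 14)
  List.replicate n_upper.toNat upper ++ List.replicate n_plain.toNat columns

-- ===== PRECONDITION & SPEC =====
def Spec_create_seating_chart (rows : Int) (columns : List String) (out : List (List String)) : Prop := out = create_seating_chart_alt rows columns
instance (rows : Int) (columns : List String) (out : List (List String)) : Decidable (Spec_create_seating_chart rows columns out) := by unfold Spec_create_seating_chart; infer_instance

-- ===== CLAIM (what is proved, stated in full; the proofs are below) =====
def Claim_equal_create_seating_chart : Prop := ∀ (rows : Int) (columns : List String), Dom_create_seating_chart rows columns → Spec_create_seating_chart rows columns (create_seating_chart rows columns)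

-- ===== LEMMAS AND PROOFS =====

-- A's inner column loop builds the template for the current row.
theorem inner_loop_eq (row : Int) (columns : List String) (acc : List String) :
    columns.foldl (fun row_data col =>
      if row ≤ 4 then
        if col == "B" then row_data ++ [" "] else row_data ++ [col]
      else row_data ++ [col]) acc
    = acc ++ (if row ≤ 4 then columns.map (fun c => if c == "B" then " " else c) else columns) := by
  induction columns generalizing acc with
  | nil => simp
  | cons c cs ih =>
    simp only [List.foldl_cons]
    rw [ih]
    by_cases h : row ≤ 4 <;> by_cases hc : c = "B" <;> simp [h, hc]

-- Main invariant, for nonnegative row counts given as a Nat.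
theorem chart_nat (columns : List String) (n : Nat) :
    create_seating_chart (n : Int) columns
    = List.replicate (min n 4) (columns.map (fun c => if c == "B" then " " else c))
      ++ List.replicate ((min n 12 - 6) + (n - 14)) columns := by
  induction n with
  | zero => simp [create_seating_chart, PySem.List.pyRange_one_eq_nil]
  | succ n ih =>
    have hsplit : PySem.List.pyRange 1 ((n : Int) + 1 + 1) 1
        = PySem.List.pyRange 1 ((n : Int) + 1) 1 ++ [(n : Int) + 1] := by
      exact PySem.List.pyRange_one_succ_right (by omega)
    unfold create_seating_chart at ih ⊢
    rw [show ((n + 1 : Nat) : Int) + 1 = (n : Int) + 1 + 1 by push_cast; ring, hsplit,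
        List.foldl_append, ih]
    simp only [List.foldl_cons, List.foldl_nil]
    by_cases hskip : (n : Int) + 1 = 5 ∨ (n : Int) + 1 = 6 ∨ (n : Int) + 1 = 13 ∨ (n : Int) + 1 = 14
    · rw [if_pos hskip]
      have h1 : min (n + 1) 4 = min n 4 := by omega
      have h2 : (min (n + 1) 12 - 6) + (n + 1 - 14) = (min n 12 - 6) + (n - 14) := by omega
      rw [h1, h2]
    · rw [if_neg hskip, inner_loop_eq]
      by_cases hle : (n : Int) + 1 ≤ 4
      · have h1 : min (n + 1) 4 = min n 4 + 1 := by omega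
        have h2 : (min (n + 1) 12 - 6) + (n + 1 - 14) = 0 := by omega
        have h2' : (min n 12 - 6) + (n - 14) = 0 := by omega
        rw [if_pos hle, h1, h2, h2', List.replicate_succ']
        simp
      · have h1 : min (n + 1) 4 = min n 4 := by omega
        have h2 : (min (n + 1) 12 - 6) + (n + 1 - 14) = ((min n 12 - 6) + (n - 14)) + 1 := by
          omega
        rw [if_neg hle, h1, h2, List.replicate_succ']
        simp [List.append_assoc]

-- ===== VERDICT (by name: the statement is the Claim_ definition above) =====
theorem create_seating_chart_spec : Claim_equal_create_seating_chart := by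
  intro rows columns _
  unfold Spec_create_seating_chart
  show create_seating_chart rows columns =
    List.replicate (max 0 (min rows 4)).toNat (columns.map (fun c => if c == "B" then " " else c))
      ++ List.replicate (max 0 (min rows 12 - 6) + max 0 (rows - 14)).toNat columns
  by_cases hneg : rows ≤ 0
  · have : create_seating_chart rows columns = [] := by
      unfold create_seating_chart
      rw [PySem.List.pyRange_one_eq_nil (by omega)]
      rfl
    rw [this]
    have h1 : (max 0 (min rows 4)).toNat = 0 := by omega
    have h2 : (max 0 (min rows 12 - 6) + max 0 (rows - 14)).toNat = 0 := by omega
    simp [h1, h2]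
  · obtain ⟨n, hn⟩ : ∃ n : Nat, rows = (n : Int) := ⟨rows.toNat, by omega⟩
    subst hn
    rw [chart_nat]
    have h1 : (max 0 (min (n : Int) 4)).toNat = min n 4 := by omega
    have h2 : (max 0 (min (n : Int) 12 - 6) + max 0 ((n : Int) - 14)).toNat
        = (min n 12 - 6) + (n - 14) := by omega
    rw [h1, h2]
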